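-- pv_equiv track=rewrite | github.com/shradhakapoor/practice-codes | Searching.py | sum_closest_zero_bruteforce
-- ===== SOURCE A (Python) =====
-- def sum_closest_zero_bruteforce(inp):
--     min_l, min_r = 0, 1
--     n = len(inp)
--     min_sum = inp[0] + inp[1]
--     for i in range(n-1):
--         for j in range(i+1, n):
--             sm = inp[i] + inp[j]
--             if abs(min_sum) > abs(sm):
--                 min_sum = sm
--                 min_l = i
--                 min_r = j
--
--     return inp[min_l],inp[min_r]
-- ===== SOURCE B (Python) =====
-- def sum_closest_zero_bruteforce(inp):
--     # sort + two pointers to find the minimal |inp[i]+inp[j]|, then one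
--     # right-to-left pass with a value->nearest-index dict to recover the
--     # lexicographically-first index pair achieving it (A's tie-break).
--     s = sorted(inp)
--     n = len(s)
--     lo, hi = 0, n - 1
--     m = abs(s[0] + s[n - 1])
--     while lo < hi:
--         t = s[lo] + s[hi]
--         if abs(t) < m:
--             m = abs(t)
--         if t < 0:
--             lo += 1
--         elif t > 0:
--             hi -= 1
--         else:
--             break
--     nearest = {}  # value -> smallest index strictly to the right
--     best = None
--     for i in range(n - 1, -1, -1):
--         v = inp[i]
--         j1 = nearest.get(m - v)
--         j2 = nearest.get(-m - v)
--         if j1 is None: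
--             j = j2
--         elif j2 is None or j1 < j2:
--             j = j1
--         else:
--             j = j2
--         if j is not None:
--             best = (i, j)
--         nearest[v] = i
--     i, j = best
--     return inp[i], inp[j]
-- ===== Notes on version B (the rewrite author's own statement) =====
-- stated objective: faster
-- what changed: Replaces the O(n^2) all-pairs scan by sort + two pointers to find the minimal |inp[i]+inp[j]|, then a single right-to-left pass with a value->nearest-index dictionary to recover the lexicographically-first index pair achieving it (A's tie-break).
import Mathlib
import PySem

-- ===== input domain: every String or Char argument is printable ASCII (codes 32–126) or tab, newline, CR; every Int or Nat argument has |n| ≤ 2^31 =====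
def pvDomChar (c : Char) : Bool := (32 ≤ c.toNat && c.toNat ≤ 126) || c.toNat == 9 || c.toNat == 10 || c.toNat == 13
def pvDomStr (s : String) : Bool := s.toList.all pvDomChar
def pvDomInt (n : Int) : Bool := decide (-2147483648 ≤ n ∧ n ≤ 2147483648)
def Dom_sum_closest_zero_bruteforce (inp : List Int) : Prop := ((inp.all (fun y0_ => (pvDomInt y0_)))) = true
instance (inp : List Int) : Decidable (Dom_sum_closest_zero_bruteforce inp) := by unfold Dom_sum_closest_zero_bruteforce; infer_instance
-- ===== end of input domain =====

-- B replaces A's O(n^2) all-pairs scan by sort + two pointers for the minimal |inp[i]+inp[j]|,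
-- then one right-to-left indexed pass to recover A's lexicographically-first tie-break pair.


-- ===== PORT A =====
-- inner loop body: one comparison with pair (i, j); state = (min_l, min_r, min_sum)
def stepA (inp : List Int) (st : Int × Int × Int) (i j : Int) : Int × Int × Int :=
  let sm := PySem.List.pyGetD inp i 0 + PySem.List.pyGetD inp j 0
  if |st.2.2| > |sm| then (i, j, sm) else st

-- row i: for j in range(i+1, n)
def rowA (inp : List Int) (n : Int) (st : Int × Int × Int) (i : Int) : Int × Int × Int :=
  (PySem.List.pyRange (i + 1) n 1).foldl (fun st j => stepA inp st i j) st

def sum_closest_zero_bruteforce (inp : List Int) : Int × Int :=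
  let n : Int := inp.length
  let init : Int × Int × Int := (0, 1, PySem.List.pyGetD inp 0 0 + PySem.List.pyGetD inp 1 0)
  let st := (PySem.List.pyRange 0 (n - 1) 1).foldl (rowA inp n) init
  (PySem.List.pyGetD inp st.1 0, PySem.List.pyGetD inp st.2.1 0)

-- ===== PORT B =====
-- while lo < hi: structurally-recursive (fuel-counted) two-pointer scan of the sorted list for the minimal |s[lo]+s[hi]|
-- fuel = hi - lo at the first call; each iteration shrinks hi - lo by exactly 1
def twoPtrLoop (s : List Int) (fuel : Nat) (lo hi : Nat) (m : Int) : Int :=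
  match fuel with
  | 0 => m
  | fuel + 1 =>
    if lo < hi then
      let t := s.getD lo 0 + s.getD hi 0
      let m' := if |t| < m then |t| else m
      if t < 0 then twoPtrLoop s fuel (lo + 1) hi m'
      else if 0 < t then twoPtrLoop s fuel lo (hi - 1) m'
      else m'
    else m

-- body of the right-to-left pass: state = (nearest : value -> smallest index to the right, best)
def stepB (inp : List Int) (m : Int) (st : PySem.Dict Int Int × Option (Int × Int)) (i : Int) :
    PySem.Dict Int Int × Option (Int × Int) :=
  let v := PySem.List.pyGetD inp i 0
  let j1 := st.1.get? (m - v)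
  let j2 := st.1.get? (-m - v)
  let j : Option Int :=
    match j1, j2 with
    | none, j2 => j2
    | some a, none => some a
    | some a, some b => if a < b then some a else some b
  let best := match j with | some jj => some (i, jj) | none => st.2
  (st.1.insert v i, best)

def sum_closest_zero_bruteforce_alt (inp : List Int) : Int × Int :=
  let s := PySem.List.sorted inp (fun x => x) false
  let n : Int := s.length
  let m0 := |PySem.List.pyGetD s 0 0 + PySem.List.pyGetD s (n - 1) 0|
  let m := twoPtrLoop s (s.length - 1) 0 (s.length - 1) m0
  let st := (PySem.List.pyRange (n - 1) (-1) (-1)).foldl (stepB inp m) (PySem.Dict.empty, none)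
  match st.2 with
  | some (i, j) => (PySem.List.pyGetD inp i 0, PySem.List.pyGetD inp j 0)
  | none => (0, 0)  -- unreachable under Pre_ (Python raises TypeError there)

-- ===== PRECONDITION & SPEC =====
-- A reads inp[0] and inp[1] unconditionally: on lists of length < 2 it raises IndexError.
def Pre_sum_closest_zero_bruteforce (inp : List Int) : Prop := 2 ≤ inp.length
instance (inp : List Int) : Decidable (Pre_sum_closest_zero_bruteforce inp) := by
  unfold Pre_sum_closest_zero_bruteforce; infer_instance

def pvWitness_sum_closest_zero_bruteforce : List Int := [3, -5, 2]

def Spec_sum_closest_zero_bruteforce (inp : List Int) (out : Int × Int) : Prop :=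
  out = sum_closest_zero_bruteforce_alt inp
instance (inp : List Int) (out : Int × Int) : Decidable (Spec_sum_closest_zero_bruteforce inp out) := by
  unfold Spec_sum_closest_zero_bruteforce; infer_instance

-- ===== CLAIM (what is proved, stated in full; the proofs are below) =====
def Claim_equal_sum_closest_zero_bruteforce : Prop :=
  ∀ (inp : List Int), Dom_sum_closest_zero_bruteforce inp →
    Pre_sum_closest_zero_bruteforce inp →
    Spec_sum_closest_zero_bruteforce inp (sum_closest_zero_bruteforce inp)

-- ===== LEMMAS AND PROOFS =====

-- Valid index pair (Int indices, Python style): 0 ≤ p < q < len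
def GoodPairI (inp : List Int) (p q : Int) : Prop := 0 ≤ p ∧ p < q ∧ q < (inp.length : Int)

def psumI (inp : List Int) (p q : Int) : Int :=
  PySem.List.pyGetD inp p 0 + PySem.List.pyGetD inp q 0

-- (p, q) lexicographically before (i, j)
def BeforeP (i j p q : Int) : Prop := p < i ∨ (p = i ∧ q < j)

-- the unique characterisation both ports are reduced to
def IsAnswer (inp : List Int) (i j : Int) : Prop :=
  GoodPairI inp i j ∧
  (∀ p q, GoodPairI inp p q → |psumI inp i j| ≤ |psumI inp p q|) ∧
  (∀ p q, GoodPairI inp p q → BeforeP i j p q → |psumI inp i j| < |psumI inp p q|)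

lemma isAnswer_unique {inp : List Int} {i j i' j' : Int}
    (h : IsAnswer inp i j) (h' : IsAnswer inp i' j') : i = i' ∧ j = j' := by
  obtain ⟨hg, hmin, hstr⟩ := h
  obtain ⟨hg', hmin', hstr'⟩ := h'
  by_contra hne
  rcases lt_trichotomy i i' with hc | hc | hc
  · have := hstr' i j hg (Or.inl hc)
    have := hmin i' j' hg'
    omega
  · subst hc
    rcases lt_trichotomy j j' with hd | hd | hd
    · have := hstr' i j hg (Or.inr ⟨rfl, hd⟩)
      have := hmin i j' hg'
      omega
    · exact hne ⟨rfl, by omega⟩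
    · have := hstr i j' hg' (Or.inr ⟨rfl, hd⟩)
      have := hmin' i j hg
      omega
  · have := hstr i' j' hg' (Or.inl hc)
    have := hmin' i j hg
    omega

-- list of all pair sums (used to transfer the minimum between inp and sorted(inp))
def pairSums : List Int → List Int
  | [] => []
  | x :: r => r.map (x + ·) ++ pairSums r

lemma pairSums_perm {l l' : List Int} (h : l.Perm l') : (pairSums l).Perm (pairSums l') := by
  induction h with
  | nil => exact List.Perm.refl _
  | cons x _ ih => exact List.Perm.append (List.Perm.map _ (by assumption)) ih
  | swap x y l =>
      simp only [pairSums, List.map_cons, List.cons_append]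
      rw [add_comm y x]
      apply List.Perm.cons
      rw [← List.append_assoc, ← List.append_assoc]
      exact List.Perm.append_right _ List.perm_append_comm
  | trans _ _ ih1 ih2 => exact ih1.trans ih2

lemma mem_pairSums_nat (l : List Int) (v : Int) :
    v ∈ pairSums l ↔ ∃ p q : Nat, p < q ∧ q < l.length ∧ v = l.getD p 0 + l.getD q 0 := by
  induction l with
  | nil => simp [pairSums]
  | cons x r ih =>
      simp only [pairSums, List.mem_append, List.mem_map, ih, List.length_cons]
      constructor
      · rintro (⟨w, hw, rfl⟩ | ⟨p, q, hpq, hq, rfl⟩)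
        · obtain ⟨q', hq', rfl⟩ := List.mem_iff_getElem.mp hw
          exact ⟨0, q' + 1, by omega, by omega, by
            rw [List.getD_cons_zero, List.getD_cons_succ, List.getD_eq_getElem r 0 hq']⟩
        · exact ⟨p + 1, q + 1, by omega, by omega, by rw [List.getD_cons_succ, List.getD_cons_succ]⟩
      · rintro ⟨p, q, hpq, hq, rfl⟩
        match p, q with
        | 0, q + 1 =>
            left
            refine ⟨r.getD q 0, ?_, by rw [List.getD_cons_zero, List.getD_cons_succ]⟩
            rw [List.getD_eq_getElem r 0 (by omega : q < r.length)]
            exact List.getElem_mem _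
        | p + 1, q + 1 =>
            right
            exact ⟨p, q, by omega, by omega, by rw [List.getD_cons_succ, List.getD_cons_succ]⟩

lemma mem_pairSums (l : List Int) (v : Int) :
    v ∈ pairSums l ↔ ∃ p q : Int, GoodPairI l p q ∧ v = psumI l p q := by
  rw [mem_pairSums_nat]
  constructor
  · rintro ⟨p, q, hpq, hq, rfl⟩
    refine ⟨(p : Int), (q : Int), ⟨by omega, by omega, by omega⟩, ?_⟩
    simp [psumI, PySem.List.pyGetD_natCast]
  · rintro ⟨p, q, ⟨h0, hpq, hq⟩, rfl⟩
    refine ⟨p.toNat, q.toNat, by omega, by omega, ?_⟩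
    have hp' : p = ((p.toNat : Nat) : Int) := by omega
    have hq' : q = ((q.toNat : Nat) : Int) := by omega
    rw [psumI, hp', hq', PySem.List.pyGetD_natCast, PySem.List.pyGetD_natCast,
      Int.toNat_natCast, Int.toNat_natCast]

def MinSpec (l : List Int) (m : Int) : Prop :=
  (∀ v ∈ pairSums l, m ≤ |v|) ∧ (∃ v ∈ pairSums l, m = |v|)

lemma minSpec_perm {l l' : List Int} (hp : l.Perm l') {m : Int} (h : MinSpec l m) : MinSpec l' m := by
  have hmem : ∀ v : Int, v ∈ pairSums l' ↔ v ∈ pairSums l := fun v => (pairSums_perm hp).symm.mem_iff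
  obtain ⟨hlb, v, hv, rfl⟩ := h
  exact ⟨fun w hw => hlb w ((hmem w).mp hw), v, (hmem v).mpr hv, rfl⟩

lemma minSpec_nonneg {l : List Int} {m : Int} (h : MinSpec l m) : 0 ≤ m := by
  obtain ⟨_, v, _, rfl⟩ := h
  exact abs_nonneg v

-- ===== A-side: loop invariant =====

def InvA (inp : List Int) (i j : Int) (st : Int × Int × Int) : Prop :=
  GoodPairI inp st.1 st.2.1 ∧ st.2.2 = psumI inp st.1 st.2.1 ∧ BeforeP i j st.1 st.2.1 ∧
  (∀ p q, GoodPairI inp p q → BeforeP i j p q → |st.2.2| ≤ |psumI inp p q|) ∧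
  (∀ p q, GoodPairI inp p q → BeforeP i j p q → BeforeP st.1 st.2.1 p q → |st.2.2| < |psumI inp p q|)

lemma stepA_inv {inp : List Int} {i j : Int} {st : Int × Int × Int}
    (hgood : GoodPairI inp i j) (h : InvA inp i j st) :
    InvA inp i (j + 1) (stepA inp st i j) := by
  obtain ⟨hg', hsum, hbef, hlb, hstr⟩ := h
  have hsm : stepA inp st i j = if |st.2.2| > |psumI inp i j| then (i, j, psumI inp i j) else st := rfl
  rw [hsm]
  split_ifs with hcmp
  · refine ⟨hgood, rfl, Or.inr ⟨rfl, lt_add_one j⟩, ?_, ?_⟩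
    · rintro p q hpq hb
      rcases hb with hb | ⟨rfl, hq⟩
      · exact le_of_lt (lt_of_lt_of_le hcmp (hlb p q hpq (Or.inl hb)))
      · by_cases hqj : q = j
        · subst hqj; exact le_refl _
        · exact le_of_lt (lt_of_lt_of_le hcmp (hlb p q hpq (Or.inr ⟨rfl, by omega⟩)))
    · rintro p q hpq _ hb2
      exact lt_of_lt_of_le hcmp (hlb p q hpq hb2)
  · rw [not_lt] at hcmp
    refine ⟨hg', hsum, ?_, ?_, ?_⟩
    · rcases hbef with h | ⟨h1, h2⟩
      · exact Or.inl h
      · exact Or.inr ⟨h1, by omega⟩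
    · rintro p q hpq hb
      rcases hb with hb | ⟨rfl, hq⟩
      · exact hlb p q hpq (Or.inl hb)
      · by_cases hqj : q = j
        · subst hqj; exact hcmp
        · exact hlb p q hpq (Or.inr ⟨rfl, by omega⟩)
    · rintro p q hpq hb hb2
      rcases hb with hb | ⟨rfl, hq⟩
      · exact hstr p q hpq (Or.inl hb) hb2
      · by_cases hqj : q = j
        · subst hqj
          exfalso
          unfold BeforeP at hb2 hbef
          omega
        · exact hstr p q hpq (Or.inr ⟨rfl, by omega⟩) hb2

-- reprocessing an already-counted pair leaves the state unchanged
lemma stepA_noop {inp : List Int} {i j : Int} {st : Int × Int × Int}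
    (hgood : GoodPairI inp i j) (h : InvA inp i (j + 1) st) :
    stepA inp st i j = st := by
  obtain ⟨hg', hsum, hbef, hlb, hstr⟩ := h
  have hle : |st.2.2| ≤ |psumI inp i j| := hlb i j hgood (Or.inr ⟨rfl, by omega⟩)
  have hsm : stepA inp st i j = if |st.2.2| > |psumI inp i j| then (i, j, psumI inp i j) else st := rfl
  rw [hsm, if_neg (by omega)]

lemma invA_congr {inp : List Int} {i j i' j' : Int} {st : Int × Int × Int}
    (hiff : ∀ p q, GoodPairI inp p q → (BeforeP i j p q ↔ BeforeP i' j' p q))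
    (h : InvA inp i j st) : InvA inp i' j' st := by
  obtain ⟨hg, hsum, hbef, hlb, hstr⟩ := h
  exact ⟨hg, hsum, (hiff _ _ hg).mp hbef,
    fun p q hpq hb => hlb p q hpq ((hiff _ _ hpq).mpr hb),
    fun p q hpq hb hb2 => hstr p q hpq ((hiff _ _ hpq).mpr hb) hb2⟩

lemma rowA_inv {inp : List Int} {i : Int} (hi : 0 ≤ i) :
    ∀ (k : Nat) (j : Int) (st : Int × Int × Int), ((inp.length : Int) - j).toNat = k →
      i < j → InvA inp i j st →
      InvA inp i (inp.length : Int)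
        (((PySem.List.pyRange j (inp.length : Int) 1)).foldl (fun st j => stepA inp st i j) st) := by
  intro k
  induction k with
  | zero =>
      intro j st hk hij hinv
      rw [PySem.List.pyRange_one_eq_nil (by omega)]
      refine invA_congr (fun p q hpq => ?_) hinv
      unfold GoodPairI at hpq
      unfold BeforeP
      omega
  | succ k ih =>
      intro j st hk hij hinv
      rw [PySem.List.pyRange_one_cons (by omega)]
      rw [List.foldl_cons]
      exact ih (j + 1) _ (by omega) (by omega) (stepA_inv ⟨hi, hij, by omega⟩ hinv)

lemma invA_row_shift {inp : List Int} {i : Int} {st : Int × Int × Int}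
    (h : InvA inp i (inp.length : Int) st) : InvA inp (i + 1) (i + 2) st := by
  refine invA_congr (fun p q hpq => ?_) h
  unfold GoodPairI at hpq
  unfold BeforeP
  omega

lemma foldA_inv {inp : List Int} :
    ∀ (k : Nat) (a : Int) (st : Int × Int × Int), ((inp.length : Int) - 1 - a).toNat = k →
      0 ≤ a → InvA inp a (a + 1) st →
      InvA inp ((inp.length : Int) - 1) (inp.length : Int)
        ((PySem.List.pyRange a ((inp.length : Int) - 1) 1).foldl (rowA inp (inp.length : Int)) st) := by
  intro k
  induction k with
  | zero =>
      intro a st hk ha hinv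
      rw [PySem.List.pyRange_one_eq_nil (by omega)]
      refine invA_congr (fun p q hpq => ?_) hinv
      unfold GoodPairI at hpq
      unfold BeforeP
      omega
  | succ k ih =>
      intro a st hk ha hinv
      rw [PySem.List.pyRange_one_cons (by omega)]
      rw [List.foldl_cons]
      refine ih (a + 1) _ (by omega) (by omega) ?_
      have hrow : InvA inp a (inp.length : Int) (rowA inp (inp.length : Int) st a) :=
        rowA_inv ha (((inp.length : Int) - (a + 1)).toNat) (a + 1) st rfl (by omega) hinv
      have := invA_row_shift hrow
      simpa [add_assoc] using this

lemma A_isAnswer {inp : List Int} (h2 : 2 ≤ inp.length) :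
    ∃ i j, IsAnswer inp i j ∧
      sum_closest_zero_bruteforce inp = (PySem.List.pyGetD inp i 0, PySem.List.pyGetD inp j 0) := by
  have hn : (2 : Int) ≤ (inp.length : Int) := by exact_mod_cast h2
  have hinit : InvA inp 0 2 (0, 1, PySem.List.pyGetD inp 0 0 + PySem.List.pyGetD inp 1 0) := by
    unfold InvA GoodPairI BeforeP
    dsimp only
    refine ⟨⟨le_refl 0, by omega, by omega⟩, rfl, Or.inr ⟨rfl, by omega⟩, ?_, ?_⟩
    · rintro p q ⟨h0, hpq, hq⟩ hb
      have hp : p = 0 := by omega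
      have hq1 : q = 1 := by omega
      subst hp; subst hq1; exact le_refl _
    · rintro p q ⟨h0, hpq, hq⟩ hb hb2
      exfalso; omega
  have hrow0 : InvA inp 0 (inp.length : Int)
      (rowA inp (inp.length : Int) (0, 1, PySem.List.pyGetD inp 0 0 + PySem.List.pyGetD inp 1 0) 0) := by
    unfold rowA
    rw [PySem.List.pyRange_one_cons (by omega : (0 : Int) + 1 < (inp.length : Int)), List.foldl_cons]
    have hinit' : InvA inp 0 ((0 : Int) + 1 + 1) (0, 1, PySem.List.pyGetD inp 0 0 + PySem.List.pyGetD inp 1 0) := by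
      have he : ((0 : Int) + 1 + 1) = 2 := by norm_num
      rw [he]; exact hinit
    have hnoop := stepA_noop (inp := inp) ⟨le_refl 0, by omega, by omega⟩ hinit'
    rw [hnoop]
    have := rowA_inv (inp := inp) (i := 0) (le_refl 0)
      (((inp.length : Int) - ((0 : Int) + 1 + 1)).toNat) ((0 : Int) + 1 + 1) _ rfl (by omega) hinit'
    exact this
  have key : InvA inp ((inp.length : Int) - 1) (inp.length : Int)
      ((PySem.List.pyRange 0 ((inp.length : Int) - 1) 1).foldl (rowA inp (inp.length : Int))
        (0, 1, PySem.List.pyGetD inp 0 0 + PySem.List.pyGetD inp 1 0)) := by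
    rw [PySem.List.pyRange_one_cons (by omega : (0 : Int) < (inp.length : Int) - 1), List.foldl_cons]
    have hsh := invA_row_shift hrow0
    have hsh' : InvA inp 1 (1 + 1)
        (rowA inp (inp.length : Int) (0, 1, PySem.List.pyGetD inp 0 0 + PySem.List.pyGetD inp 1 0) 0) := by
      have he : ((0 : Int) + 1) = 1 := by norm_num
      have he2 : ((0 : Int) + 2) = 1 + 1 := by norm_num
      rw [he, he2] at hsh; exact hsh
    exact foldA_inv (((inp.length : Int) - 1 - 1).toNat) 1 _ rfl (by omega) hsh'
  obtain ⟨hg, hsum, hbef, hlb, hstr⟩ := key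
  refine ⟨_, _, ⟨hg, ?_, ?_⟩, rfl⟩
  · intro p q hpq
    have hb : BeforeP ((inp.length : Int) - 1) (inp.length : Int) p q := by
      obtain ⟨h0, hpq', hq⟩ := hpq; unfold BeforeP; omega
    have := hlb p q hpq hb
    rwa [hsum] at this
  · intro p q hpq hb2
    have hb : BeforeP ((inp.length : Int) - 1) (inp.length : Int) p q := by
      obtain ⟨h0, hpq', hq⟩ := hpq; unfold BeforeP; omega
    have := hstr p q hpq hb hb2
    rwa [hsum] at this

-- ===== B-side: two pointers =====

lemma twoPtr_spec (s : List Int)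
    (hmono : ∀ p q : Nat, p ≤ q → q < s.length → s.getD p 0 ≤ s.getD q 0) :
    ∀ (fuel : Nat) (lo hi : Nat) (m : Int), hi - lo ≤ fuel → hi < s.length →
      twoPtrLoop s fuel lo hi m ≤ m ∧
      (twoPtrLoop s fuel lo hi m = m ∨
        ∃ p q : Nat, lo ≤ p ∧ p < q ∧ q ≤ hi ∧ twoPtrLoop s fuel lo hi m = |s.getD p 0 + s.getD q 0|) ∧
      (∀ p q : Nat, lo ≤ p → p < q → q ≤ hi → twoPtrLoop s fuel lo hi m ≤ |s.getD p 0 + s.getD q 0|) := by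
  intro fuel
  induction fuel with
  | zero =>
      intro lo hi m hk hhi
      refine ⟨le_refl m, Or.inl rfl, fun p q hp hpq hq => ?_⟩
      exfalso; omega
  | succ fuel ih =>
      intro lo hi m hk hhi
      by_cases hlh : lo < hi
      · have hunf : twoPtrLoop s (fuel + 1) lo hi m =
            (if s.getD lo 0 + s.getD hi 0 < 0 then
              twoPtrLoop s fuel (lo + 1) hi
                (if |s.getD lo 0 + s.getD hi 0| < m then |s.getD lo 0 + s.getD hi 0| else m)
            else if 0 < s.getD lo 0 + s.getD hi 0 then
              twoPtrLoop s fuel lo (hi - 1)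
                (if |s.getD lo 0 + s.getD hi 0| < m then |s.getD lo 0 + s.getD hi 0| else m)
            else (if |s.getD lo 0 + s.getD hi 0| < m then |s.getD lo 0 + s.getD hi 0| else m)) := by
          simp only [twoPtrLoop, if_pos hlh]
        rw [hunf]
        set t := s.getD lo 0 + s.getD hi 0 with hT
        set m' := (if |t| < m then |t| else m) with hM
        have hm'm : m' ≤ m := by
          rw [hM]; split_ifs with hc
          · exact le_of_lt hc
          · exact le_refl m
        have hm't : m' ≤ |t| := by
          rw [hM]; split_ifs with hc
          · exact le_refl _
          · omega
        have hm'cases : m' = m ∨ m' = |t| := by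
          rw [hM]; split_ifs
          · exact Or.inr rfl
          · exact Or.inl rfl
        rcases lt_trichotomy t 0 with ht | ht | ht
        · rw [if_pos ht]
          obtain ⟨c1, c2, c3⟩ := ih (lo + 1) hi m' (by omega) hhi
          refine ⟨le_trans c1 hm'm, ?_, ?_⟩
          · rcases c2 with hr | ⟨p, q, hp, hpq, hq, hr⟩
            · rcases hm'cases with hmm | hmt
              · exact Or.inl (by rw [hr, hmm])
              · exact Or.inr ⟨lo, hi, le_refl lo, hlh, le_refl hi, by rw [hr, hmt]⟩
            · exact Or.inr ⟨p, q, by omega, hpq, hq, hr⟩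
          · intro p q hp hpq hq
            by_cases hplo : p = lo
            · subst hplo
              have hmono1 : s.getD q 0 ≤ s.getD hi 0 := hmono q hi hq hhi
              have habs1 : |t| = -t := abs_of_neg ht
              have hneg : s.getD p 0 + s.getD q 0 < 0 := by omega
              have habs2 : |s.getD p 0 + s.getD q 0| = -(s.getD p 0 + s.getD q 0) :=
                abs_of_neg hneg
              have hc1 := le_trans c1 hm't
              omega
            · exact c3 p q (by omega) hpq hq
        · rw [if_neg (by omega), if_neg (by omega)]
          refine ⟨hm'm, ?_, ?_⟩
          · rcases hm'cases with hmm | hmt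
            · exact Or.inl hmm
            · exact Or.inr ⟨lo, hi, le_refl lo, hlh, le_refl hi, hmt⟩
          · intro p q hp hpq hq
            have h0 : |t| = 0 := by rw [ht]; exact abs_zero
            have hnn := abs_nonneg (s.getD p 0 + s.getD q 0)
            omega
        · rw [if_neg (by omega), if_pos ht]
          obtain ⟨c1, c2, c3⟩ := ih lo (hi - 1) m' (by omega) (by omega)
          refine ⟨le_trans c1 hm'm, ?_, ?_⟩
          · rcases c2 with hr | ⟨p, q, hp, hpq, hq, hr⟩
            · rcases hm'cases with hmm | hmt
              · exact Or.inl (by rw [hr, hmm])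
              · exact Or.inr ⟨lo, hi, le_refl lo, hlh, le_refl hi, by rw [hr, hmt]⟩
            · exact Or.inr ⟨p, q, hp, hpq, by omega, hr⟩
          · intro p q hp hpq hq
            by_cases hqhi : q = hi
            · subst hqhi
              have hmono1 : s.getD lo 0 ≤ s.getD p 0 := hmono lo p hp (by omega)
              have hpos : 0 < s.getD p 0 + s.getD q 0 := by omega
              have habs2 : |s.getD p 0 + s.getD q 0| = s.getD p 0 + s.getD q 0 :=
                abs_of_pos hpos
              have habs1 : |t| = t := abs_of_pos ht
              have hc1 := le_trans c1 hm't
              omega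
            · exact c3 p q hp hpq (by omega)
      · have hunf : twoPtrLoop s (fuel + 1) lo hi m = m := by
          simp only [twoPtrLoop, if_neg hlh]
        rw [hunf]
        refine ⟨le_refl m, Or.inl rfl, fun p q hp hpq hq => ?_⟩
        exfalso; omega

lemma B_minSpec {inp : List Int} (h2 : 2 ≤ inp.length) :
    MinSpec inp (twoPtrLoop (PySem.List.sorted inp (fun x => x) false)
      ((PySem.List.sorted inp (fun x => x) false).length - 1) 0
      ((PySem.List.sorted inp (fun x => x) false).length - 1)
      (|PySem.List.pyGetD (PySem.List.sorted inp (fun x => x) false) 0 0 +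
        PySem.List.pyGetD (PySem.List.sorted inp (fun x => x) false)
          ((((PySem.List.sorted inp (fun x => x) false).length : Int)) - 1) 0|)) := by
  set s := PySem.List.sorted inp (fun x => x) false with hs
  have hperm : s.Perm inp := PySem.List.sorted_perm inp (fun x => x) false
  have hlen : s.length = inp.length := hperm.length_eq
  have hmono : ∀ p q : Nat, p ≤ q → q < s.length → s.getD p 0 ≤ s.getD q 0 := by
    intro p q hpq hq
    rw [List.getD_eq_getElem s 0 (by omega), List.getD_eq_getElem s 0 hq]
    exact PySem.List.sorted_id_getElem_mono inp hpq hq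
  have hm0 : |PySem.List.pyGetD s 0 0 + PySem.List.pyGetD s ((s.length : Int) - 1) 0| =
      |s.getD 0 0 + s.getD (s.length - 1) 0| := by
    have h1 : PySem.List.pyGetD s 0 0 = s.getD 0 0 := PySem.List.pyGetD_zero s 0
    have h2 : ((s.length : Int) - 1) = ((s.length - 1 : Nat) : Int) := by omega
    rw [h1, h2, PySem.List.pyGetD_natCast]
  rw [hm0]
  obtain ⟨c1, c2, c3⟩ := twoPtr_spec s hmono (s.length - 1) 0 (s.length - 1)
    (|s.getD 0 0 + s.getD (s.length - 1) 0|) (by omega) (by omega)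
  apply minSpec_perm hperm
  constructor
  · intro w hw
    obtain ⟨p, q, hpq, hq, rfl⟩ := (mem_pairSums_nat s w).mp hw
    exact c3 p q (Nat.zero_le p) hpq (by omega)
  · rcases c2 with hr | ⟨p, q, hp, hpq, hq, hr⟩
    · exact ⟨s.getD 0 0 + s.getD (s.length - 1) 0,
        (mem_pairSums_nat s _).mpr ⟨0, s.length - 1, by omega, by omega, rfl⟩, hr⟩
    · exact ⟨s.getD p 0 + s.getD q 0,
        (mem_pairSums_nat s _).mpr ⟨p, q, hpq, by omega, rfl⟩, hr⟩

-- ===== B-side: right-to-left pass =====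

-- invariant after all indices > k have been processed
def InvB (inp : List Int) (m k : Int) (st : PySem.Dict Int Int × Option (Int × Int)) : Prop :=
  (∀ v j, st.1.get? v = some j ↔
    (k < j ∧ j < (inp.length : Int) ∧ PySem.List.pyGetD inp j 0 = v ∧
      ∀ j', k < j' → j' < j → PySem.List.pyGetD inp j' 0 ≠ v)) ∧
  (∀ i j, st.2 = some (i, j) →
    (GoodPairI inp i j ∧ k < i ∧ |psumI inp i j| = m ∧
      ∀ p q, GoodPairI inp p q → k < p → |psumI inp p q| = m → (i < p ∨ (i = p ∧ j ≤ q)))) ∧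
  (st.2 = none → ∀ p q, GoodPairI inp p q → k < p → |psumI inp p q| ≠ m)

lemma dict_found {inp : List Int} {k : Int} {d : PySem.Dict Int Int}
    (h1 : ∀ v j, d.get? v = some j ↔
      (k < j ∧ j < (inp.length : Int) ∧ PySem.List.pyGetD inp j 0 = v ∧
        ∀ j', k < j' → j' < j → PySem.List.pyGetD inp j' 0 ≠ v))
    {w q : Int} (hq1 : k < q) (hq2 : q < (inp.length : Int))
    (hq3 : PySem.List.pyGetD inp q 0 = w) :
    ∃ j, d.get? w = some j ∧ j ≤ q := by
  classical
  let P : Nat → Prop := fun e => k + 1 + e < (inp.length : Int) ∧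
    PySem.List.pyGetD inp (k + 1 + e) 0 = w
  have hPq : P (q - (k + 1)).toNat := by
    constructor
    · omega
    · have : k + 1 + ((q - (k + 1)).toNat : Int) = q := by omega
      rw [this]; exact hq3
  have hex : ∃ e, P e := ⟨_, hPq⟩
  let e0 := Nat.find hex
  refine ⟨k + 1 + e0, ?_, ?_⟩
  · rw [h1]
    obtain ⟨hlt, hval⟩ := Nat.find_spec hex
    refine ⟨by omega, hlt, hval, ?_⟩
    intro j' hj1' hj2' hval'
    have he' : P (j' - (k + 1)).toNat := by
      constructor
      · omega
      · have : k + 1 + ((j' - (k + 1)).toNat : Int) = j' := by omega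
        rw [this]; exact hval'
    have := Nat.find_min hex (m := (j' - (k + 1)).toNat) (by omega)
    exact this he'
  · have := Nat.find_min' hex hPq
    omega

lemma stepB_inv {inp : List Int} {m k : Int} {st : PySem.Dict Int Int × Option (Int × Int)}
    (hm : 0 ≤ m) (hk0 : 0 ≤ k) (hkn : k < (inp.length : Int)) (h : InvB inp m k st) :
    InvB inp m (k - 1) (stepB inp m st k) := by
  obtain ⟨h1, h2, h3⟩ := h
  have hchar : ∀ q : Int, |psumI inp k q| = m ↔
      (PySem.List.pyGetD inp q 0 = m - PySem.List.pyGetD inp k 0 ∨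
       PySem.List.pyGetD inp q 0 = -m - PySem.List.pyGetD inp k 0) := by
    intro q
    unfold psumI
    rw [abs_eq hm]
    omega
  -- the new dictionary satisfies its clause at k - 1
  have hd1 : ∀ w j, ((st.1.insert (PySem.List.pyGetD inp k 0) k).get? w = some j) ↔
      (k - 1 < j ∧ j < (inp.length : Int) ∧ PySem.List.pyGetD inp j 0 = w ∧
        ∀ j', k - 1 < j' → j' < j → PySem.List.pyGetD inp j' 0 ≠ w) := by
    intro w j
    rw [PySem.Dict.get?_insert]
    split_ifs with hw
    · subst hw
      constructor
      · intro hsome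
        have hjk : j = k := by injection hsome with he; omega
        subst hjk
        exact ⟨by omega, hkn, rfl, fun j' ha hb => by omega⟩
      · rintro ⟨ha, hb, hc, hd⟩
        have hjk : j = k := by
          by_contra hne
          have hklt : k < j := by
            rcases lt_or_gt_of_ne hne with hx | hx
            · exfalso; omega
            · omega
          exact hd k (by omega) hklt rfl
        rw [hjk]
    · rw [h1 w j]
      constructor
      · rintro ⟨ha, hb, hc, hd⟩
        refine ⟨by omega, hb, hc, ?_⟩
        intro j' ha' hb' hval
        by_cases hj'k : j' = k
        · subst hj'k; exact hw (hval.symm)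
        · exact hd j' (by omega) hb' hval
      · rintro ⟨ha, hb, hc, hd⟩
        have hjk : j ≠ k := fun he => hw (by rw [← he]; exact hc.symm) 
        refine ⟨by omega, hb, hc, ?_⟩
        intro j' ha' hb' hval
        exact hd j' (by omega) hb' hval
  -- case analysis on the two lookups
  rcases hj1 : st.1.get? (m - PySem.List.pyGetD inp k 0) with _ | a <;>
    rcases hj2 : st.1.get? (-m - PySem.List.pyGetD inp k 0) with _ | b
  -- none, none : best unchanged, no pair starting at k sums to ±m
  · have hstep : stepB inp m st k = (st.1.insert (PySem.List.pyGetD inp k 0) k, st.2) := by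
      simp only [stepB, hj1, hj2]
    rw [hstep]
    have hnoq : ∀ q, k < q → q < (inp.length : Int) → |psumI inp k q| ≠ m := by
      intro q hq1 hq2 hqm
      rcases (hchar q).mp hqm with hval | hval
      · obtain ⟨j, hjs, _⟩ := dict_found h1 hq1 hq2 hval
        rw [hj1] at hjs; simp at hjs
      · obtain ⟨j, hjs, _⟩ := dict_found h1 hq1 hq2 hval
        rw [hj2] at hjs; simp at hjs
    refine ⟨hd1, ?_, ?_⟩
    · intro i j0 hsome
      obtain ⟨hg, hki, hm', hlex⟩ := h2 i j0 hsome
      refine ⟨hg, by omega, hm', ?_⟩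
      intro p q hpq hkp hqm
      by_cases hpk : p = k
      · exfalso; subst hpk; exact hnoq q hpq.2.1 hpq.2.2 hqm
      · exact hlex p q hpq (by omega) hqm
    · intro hnone p q hpq hkp hqm
      by_cases hpk : p = k
      · subst hpk; exact hnoq q hpq.2.1 hpq.2.2 hqm
      · exact h3 hnone p q hpq (by omega) hqm
  -- none, some b : pair (k, b) found via value -m - inp[k]
  · have hstep : stepB inp m st k = (st.1.insert (PySem.List.pyGetD inp k 0) k, some (k, b)) := by
      simp only [stepB, hj1, hj2]
    rw [hstep]
    obtain ⟨hbk, hbn, hbv, hbmin⟩ := (h1 _ b).mp hj2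
    have hjm : |psumI inp k b| = m := (hchar b).mpr (Or.inr hbv)
    have hleast : ∀ q, k < q → q < (inp.length : Int) → |psumI inp k q| = m → b ≤ q := by
      intro q hq1 hq2 hqm
      rcases (hchar q).mp hqm with hval | hval
      · obtain ⟨j, hjs, _⟩ := dict_found h1 hq1 hq2 hval
        rw [hj1] at hjs; simp at hjs
      · by_contra hnot
        exact hbmin q hq1 (by omega) hval
    refine ⟨hd1, ?_, ?_⟩
    · intro i j0 hsome
      have hp : k = i ∧ b = j0 := by simpa using hsome
      obtain ⟨rfl, rfl⟩ := hp
      refine ⟨⟨hk0, hbk, hbn⟩, by omega, hjm, ?_⟩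
      intro p q hpq hkp hqm
      by_cases hpk : p = k
      · subst hpk; exact Or.inr ⟨rfl, hleast q hpq.2.1 hpq.2.2 hqm⟩
      · exact Or.inl (by omega)
    · intro hnone; simp at hnone
  -- some a, none : pair (k, a) found via value m - inp[k]
  · have hstep : stepB inp m st k = (st.1.insert (PySem.List.pyGetD inp k 0) k, some (k, a)) := by
      simp only [stepB, hj1, hj2]
    rw [hstep]
    obtain ⟨hak, han, hav, hamin⟩ := (h1 _ a).mp hj1
    have hjm : |psumI inp k a| = m := (hchar a).mpr (Or.inl hav)
    have hleast : ∀ q, k < q → q < (inp.length : Int) → |psumI inp k q| = m → a ≤ q := by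
      intro q hq1 hq2 hqm
      rcases (hchar q).mp hqm with hval | hval
      · by_contra hnot
        exact hamin q hq1 (by omega) hval
      · obtain ⟨j, hjs, _⟩ := dict_found h1 hq1 hq2 hval
        rw [hj2] at hjs; simp at hjs
    refine ⟨hd1, ?_, ?_⟩
    · intro i j0 hsome
      have hp : k = i ∧ a = j0 := by simpa using hsome
      obtain ⟨rfl, rfl⟩ := hp
      refine ⟨⟨hk0, hak, han⟩, by omega, hjm, ?_⟩
      intro p q hpq hkp hqm
      by_cases hpk : p = k
      · subst hpk; exact Or.inr ⟨rfl, hleast q hpq.2.1 hpq.2.2 hqm⟩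
      · exact Or.inl (by omega)
    · intro hnone; simp at hnone
  -- some a, some b : both values occur, take the smaller index
  · obtain ⟨hak, han, hav, hamin⟩ := (h1 _ a).mp hj1
    obtain ⟨hbk, hbn, hbv, hbmin⟩ := (h1 _ b).mp hj2
    have hleast : ∀ q, k < q → q < (inp.length : Int) → |psumI inp k q| = m →
        a ≤ q ∨ b ≤ q := by
      intro q hq1 hq2 hqm
      rcases (hchar q).mp hqm with hval | hval
      · left; by_contra hnot; exact hamin q hq1 (by omega) hval
      · right; by_contra hnot; exact hbmin q hq1 (by omega) hval
    by_cases hab : a < b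
    · have hstep : stepB inp m st k = (st.1.insert (PySem.List.pyGetD inp k 0) k, some (k, a)) := by
        simp only [stepB, hj1, hj2, if_pos hab]
      rw [hstep]
      have hjm : |psumI inp k a| = m := (hchar a).mpr (Or.inl hav)
      refine ⟨hd1, ?_, ?_⟩
      · intro i j0 hsome
        have hp : k = i ∧ a = j0 := by simpa using hsome
        obtain ⟨rfl, rfl⟩ := hp
        refine ⟨⟨hk0, hak, han⟩, by omega, hjm, ?_⟩
        intro p q hpq hkp hqm
        by_cases hpk : p = k
        · subst hpk; refine Or.inr ⟨rfl, ?_⟩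
          rcases hleast q hpq.2.1 hpq.2.2 hqm with hx | hx <;> omega
        · exact Or.inl (by omega)
      · intro hnone; simp at hnone
    · have hstep : stepB inp m st k = (st.1.insert (PySem.List.pyGetD inp k 0) k, some (k, b)) := by
        simp only [stepB, hj1, hj2, if_neg hab]
      rw [hstep]
      have hjm : |psumI inp k b| = m := (hchar b).mpr (Or.inr hbv)
      refine ⟨hd1, ?_, ?_⟩
      · intro i j0 hsome
        have hp : k = i ∧ b = j0 := by simpa using hsome
        obtain ⟨rfl, rfl⟩ := hp
        refine ⟨⟨hk0, hbk, hbn⟩, by omega, hjm, ?_⟩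
        intro p q hpq hkp hqm
        by_cases hpk : p = k
        · subst hpk; refine Or.inr ⟨rfl, ?_⟩
          rcases hleast q hpq.2.1 hpq.2.2 hqm with hx | hx <;> omega
        · exact Or.inl (by omega)
      · intro hnone; simp at hnone


lemma foldB_inv {inp : List Int} {m : Int} (hm : 0 ≤ m) :
    ∀ (c : Nat) (k : Int) (st : PySem.Dict Int Int × Option (Int × Int)), (k + 1).toNat = c →
      -1 ≤ k → k < (inp.length : Int) → InvB inp m k st →
      InvB inp m (-1) ((PySem.List.pyRange k (-1) (-1)).foldl (stepB inp m) st) := by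
  intro c
  induction c with
  | zero =>
      intro k st hc h0 hn hinv
      have hk : k = -1 := by omega
      subst hk
      rw [PySem.List.pyRange_neg_one_eq_nil (by omega)]
      exact hinv
  | succ c ih =>
      intro k st hc h0 hn hinv
      rw [PySem.List.pyRange_neg_one_cons (by omega), List.foldl_cons]
      exact ih (k - 1) _ (by omega) (by omega) (by omega)
        (stepB_inv hm (by omega) hn hinv)

lemma B_isAnswer {inp : List Int} (h2 : 2 ≤ inp.length) :
    ∃ i j, IsAnswer inp i j ∧
      sum_closest_zero_bruteforce_alt inp = (PySem.List.pyGetD inp i 0, PySem.List.pyGetD inp j 0) := by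
  have hperm : (PySem.List.sorted inp (fun x => x) false).Perm inp :=
    PySem.List.sorted_perm inp (fun x => x) false
  have hlen : (PySem.List.sorted inp (fun x => x) false).length = inp.length := hperm.length_eq
  have hminspec := B_minSpec h2
  set m := twoPtrLoop (PySem.List.sorted inp (fun x => x) false)
      ((PySem.List.sorted inp (fun x => x) false).length - 1) 0
      ((PySem.List.sorted inp (fun x => x) false).length - 1)
      (|PySem.List.pyGetD (PySem.List.sorted inp (fun x => x) false) 0 0 +
        PySem.List.pyGetD (PySem.List.sorted inp (fun x => x) false)
          ((((PySem.List.sorted inp (fun x => x) false).length : Int)) - 1) 0|) with hmdef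
  have hm0 : 0 ≤ m := minSpec_nonneg hminspec
  have hinit : InvB inp m ((inp.length : Int) - 1) (PySem.Dict.empty, none) := by
    refine ⟨?_, ?_, ?_⟩
    · intro v j
      rw [PySem.Dict.get?_empty]
      constructor
      · intro hx; exact absurd hx (by simp)
      · rintro ⟨ha, hb, _, _⟩; exfalso; omega
    · intro i j hsome; exact absurd hsome (by simp)
    · rintro _ p q ⟨ha, hb, hc⟩ hkp; exfalso; omega
  have hfin := foldB_inv (inp := inp) hm0 (((inp.length : Int) - 1 + 1).toNat)
      ((inp.length : Int) - 1) (PySem.Dict.empty, none) rfl (by omega) (by omega) hinit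
  obtain ⟨f1, f2, f3⟩ := hfin
  have hsl : ((PySem.List.sorted inp (fun x => x) false).length : Int) - 1 =
      (inp.length : Int) - 1 := by rw [hlen]
  have hout : sum_closest_zero_bruteforce_alt inp =
      (match ((PySem.List.pyRange ((inp.length : Int) - 1) (-1) (-1)).foldl (stepB inp m)
          (PySem.Dict.empty, none)).2 with
       | some (i, j) => (PySem.List.pyGetD inp i 0, PySem.List.pyGetD inp j 0)
       | none => ((0 : Int), (0 : Int))) := by
    rw [← hsl, hmdef]
    rfl
  rcases hbest : ((PySem.List.pyRange ((inp.length : Int) - 1) (-1) (-1)).foldl (stepB inp m)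
      (PySem.Dict.empty, none)).2 with _ | ⟨i, j⟩
  · exfalso
    obtain ⟨_, v, hv, hmv⟩ := hminspec
    obtain ⟨p, q, hpq, rfl⟩ := (mem_pairSums inp v).mp hv
    exact f3 hbest p q hpq (by have := hpq.1; omega) hmv.symm
  · obtain ⟨hg, _, hjm, hlex⟩ := f2 i j hbest
    refine ⟨i, j, ⟨hg, ?_, ?_⟩, ?_⟩
    · intro p q hpq
      rw [hjm]
      exact hminspec.1 _ ((mem_pairSums inp _).mpr ⟨p, q, hpq, rfl⟩)
    · intro p q hpq hb
      have hle : m ≤ |psumI inp p q| :=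
        hminspec.1 _ ((mem_pairSums inp _).mpr ⟨p, q, hpq, rfl⟩)
      rw [hjm]
      rcases eq_or_lt_of_le hle with heq | hlt
      · exfalso
        have hcontra := hlex p q hpq (by have := hpq.1; omega) heq.symm
        unfold BeforeP at hb
        omega
      · exact hlt
    · rw [hout, hbest]

-- ===== VERDICT (by name: the statement is the Claim_ definition above) =====
theorem sum_closest_zero_bruteforce_spec : Claim_equal_sum_closest_zero_bruteforce := by
  intro inp _ hpre
  obtain ⟨i, j, ha, hea⟩ := A_isAnswer (inp := inp) hpre
  obtain ⟨i', j', hb, heb⟩ := B_isAnswer (inp := inp) hpre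
  obtain ⟨hi, hj⟩ := isAnswer_unique ha hb
  unfold Spec_sum_closest_zero_bruteforce
  rw [hea, heb, hi, hj]
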